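-- pv_equiv track=rewrite | github.com/IshritChavan/mlops-stock-prediction | data_ingestion.py | _pick_price_column
-- ===== SOURCE A (Python) =====
-- from typing import Dict, List, Optional
--
-- def _pick_price_column(cols: list[str]) -> Optional[str]:
--     """
--     Try to identify a reasonable price column from lowercase column names.
--     Preference:
--       1) adjusted_close
--       2) contains both 'adj' and 'close'
--       3) close
--       4) contains 'nav'       (some mutual funds expose NAV)
--       5) contains 'price'
--     """
--     s = set(cols)
--     if "adjusted_close" in s:
--         return "adjusted_close"
--     for c in cols:
--         if "adj" in c and "close" in c:
--             return c
--     if "close" in s: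
--         return "close"
--     for c in cols:
--         if "nav" in c:
--             return c
--     for c in cols:
--         if "price" in c:
--             return c
--     return None
-- ===== SOURCE B (Python) =====
-- from typing import Optional
--
--
-- def _prio(c: str) -> int:
--     if c == "adjusted_close":
--         return 1
--     if "adj" in c and "close" in c:
--         return 2
--     if c == "close":
--         return 3
--     if "nav" in c:
--         return 4
--     if "price" in c:
--         return 5
--     return 6
--
--
-- def _pick_price_column(cols: list[str]) -> Optional[str]:
--     """One pass: argmin by priority level, first occurrence wins a tie."""
--     best = None
--     bestp = 6
--     for c in cols:
--         p = _prio(c)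
--         if p < bestp:
--             best, bestp = c, p
--     return best
-- ===== Notes on version B (the rewrite author's own statement) =====
-- stated objective: alternative
-- what changed: Replaces five sequential membership/scan passes over cols with a single pass computing a per-column priority and tracking the argmin (strict '<' so the earliest column at a level wins).
import Mathlib
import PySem

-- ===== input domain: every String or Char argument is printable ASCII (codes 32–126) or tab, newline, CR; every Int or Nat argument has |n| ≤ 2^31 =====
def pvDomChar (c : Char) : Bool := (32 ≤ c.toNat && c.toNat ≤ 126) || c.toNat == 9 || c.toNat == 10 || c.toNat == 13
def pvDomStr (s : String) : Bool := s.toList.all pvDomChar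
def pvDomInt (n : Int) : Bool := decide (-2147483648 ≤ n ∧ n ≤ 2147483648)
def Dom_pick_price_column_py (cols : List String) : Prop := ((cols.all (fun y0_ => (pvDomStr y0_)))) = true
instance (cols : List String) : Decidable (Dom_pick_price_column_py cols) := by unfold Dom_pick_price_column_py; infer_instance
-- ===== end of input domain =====

-- B replaces A's five sequential membership/scan passes with one pass tracking the argmin of a
-- per-column priority (alternative decomposition, same cost); both are pure, no side effects.

-- ===== PORT A =====
def pick_price_column_py (cols : List String) : Option String :=
  let s := PySem.Set.ofList cols
  if PySem.Set.contains s "adjusted_close" then some "adjusted_close"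
  else
    match cols.find? (fun c => PySem.Str.isIn "adj" c && PySem.Str.isIn "close" c) with
    | some c => some c
    | none =>
      if PySem.Set.contains s "close" then some "close"
      else
        match cols.find? (fun c => PySem.Str.isIn "nav" c) with
        | some c => some c
        | none => cols.find? (fun c => PySem.Str.isIn "price" c)

-- ===== PORT B =====
def pvPrio (c : String) : Nat :=
  if c = "adjusted_close" then 1
  else if PySem.Str.isIn "adj" c && PySem.Str.isIn "close" c then 2
  else if c = "close" then 3
  else if PySem.Str.isIn "nav" c then 4
  else if PySem.Str.isIn "price" c then 5
  else 6

def pick_price_column_py_alt (cols : List String) : Option String :=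
  (cols.foldl
    (fun (st : Option String × Nat) c =>
      let p := pvPrio c
      if p < st.2 then (some c, p) else st)
    (none, 6)).1

-- ===== PRECONDITION & SPEC =====
def Spec_pick_price_column_py (cols : List String) (out : Option String) : Prop := out = pick_price_column_py_alt cols
instance (cols : List String) (out : Option String) : Decidable (Spec_pick_price_column_py cols out) := by unfold Spec_pick_price_column_py; infer_instance

-- ===== CLAIM (what is proved, stated in full; the proofs are below) =====
def Claim_equal_pick_price_column_py : Prop := ∀ (cols : List String), Dom_pick_price_column_py cols → Spec_pick_price_column_py cols (pick_price_column_py cols)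

-- ===== LEMMAS AND PROOFS =====

/-- minimum priority occurring in `cols` (6 when empty / nothing matches). -/
def pvMinp (cols : List String) : Nat := cols.foldr (fun c m => min (pvPrio c) m) 6

theorem pvPrio_bounds (c : String) : 1 ≤ pvPrio c ∧ pvPrio c ≤ 6 := by
  unfold pvPrio; split_ifs <;> omega

theorem pvMinp_le_of_mem {cols : List String} {c : String} (h : c ∈ cols) :
    pvMinp cols ≤ pvPrio c := by
  induction cols with
  | nil => cases h
  | cons a t ih =>
    rcases List.mem_cons.mp h with rfl | h
    · simp only [pvMinp, List.foldr]; omega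
    · have := ih h; simp only [pvMinp, List.foldr] at *; omega

theorem pvMinp_mem (cols : List String) :
    pvMinp cols = 6 ∨ ∃ c ∈ cols, pvPrio c = pvMinp cols := by
  induction cols with
  | nil => left; rfl
  | cons a t ih =>
    have hmin : pvMinp (a :: t) = min (pvPrio a) (pvMinp t) := rfl
    by_cases h : pvPrio a ≤ pvMinp t
    · right; exact ⟨a, List.mem_cons_self, by omega⟩
    · rcases ih with h6 | ⟨c, hc, hp⟩
      · left; omega
      · right; exact ⟨c, List.mem_cons_of_mem _ hc, by omega⟩

/-- `find?` only depends on the predicate's values on members. -/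
theorem pvFind?_congr {α : Type} {l : List α} {p q : α → Bool}
    (h : ∀ a ∈ l, p a = q a) : l.find? p = l.find? q := by
  induction l with
  | nil => rfl
  | cons a t ih =>
    simp only [List.find?_cons, h a List.mem_cons_self]
    cases q a
    · exact ih fun b hb => h b (List.mem_cons_of_mem _ hb)
    · rfl

/-- `find?` for a predicate that singles out one value. -/
theorem pvFind?_of_mem_uniq {α : Type} {l : List α} {p : α → Bool} {a : α}
    (ha : a ∈ l) (hpa : p a = true) (huniq : ∀ b, p b = true → b = a) :
    l.find? p = some a := by
  induction l with
  | nil => cases ha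
  | cons b t ih =>
    cases hpb : p b with
    | true =>
      have hba := huniq b hpb
      subst hba
      simp [hpb]
    | false =>
      have hab : a ≠ b := fun h => by rw [h, hpb] at hpa; cases hpa
      have hat : a ∈ t := by
        rcases List.mem_cons.mp ha with h | h
        · exact absurd h hab
        · exact h
      simp [hpb, ih hat]

theorem pvPrio_eq_one_iff (c : String) : pvPrio c = 1 ↔ c = "adjusted_close" := by
  unfold pvPrio; split_ifs <;> simp_all

theorem pvPrio_eq_two_iff {c : String} (h1 : c ≠ "adjusted_close") :
    pvPrio c = 2 ↔ (PySem.Str.isIn "adj" c && PySem.Str.isIn "close" c) = true := by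
  unfold pvPrio
  rw [if_neg h1]
  split_ifs <;> simp_all

theorem pvPrio_eq_three_iff (c : String) : pvPrio c = 3 ↔ c = "close" := by
  constructor
  · intro h; unfold pvPrio at h; split_ifs at h <;> simp_all
  · intro h; subst h; decide

theorem pvPrio_eq_four_iff {c : String} (h1 : c ≠ "adjusted_close")
    (h2 : (PySem.Str.isIn "adj" c && PySem.Str.isIn "close" c) = false) :
    pvPrio c = 4 ↔ PySem.Str.isIn "nav" c = true := by
  constructor
  · intro h; unfold pvPrio at h; split_ifs at h <;> simp_all
  · intro h
    have h3 : c ≠ "close" := by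
      intro hc; subst hc; revert h; decide
    unfold pvPrio
    rw [if_neg h1, h2, if_neg (by exact Bool.false_ne_true), if_neg h3, if_pos h]

theorem pvPrio_eq_five_iff {c : String} (h1 : c ≠ "adjusted_close")
    (h2 : (PySem.Str.isIn "adj" c && PySem.Str.isIn "close" c) = false)
    (h4 : PySem.Str.isIn "nav" c = false) :
    pvPrio c = 5 ↔ PySem.Str.isIn "price" c = true := by
  constructor
  · intro h; unfold pvPrio at h; split_ifs at h <;> simp_all
  · intro h
    have h3 : c ≠ "close" := by
      intro hc; subst hc; revert h; decide
    unfold pvPrio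
    rw [if_neg h1, h2, if_neg (by exact Bool.false_ne_true), if_neg h3, h4,
      if_neg (by exact Bool.false_ne_true), if_pos h]

/-- The B fold, characterised: starting from a state of priority `≤ 6`, it returns the first
    column of priority below the state's, at the minimal priority, else the state unchanged. -/
theorem pvLoop_eq (cols : List String) (st : Option String × Nat) (hst : st.2 ≤ 6) :
    cols.foldl
      (fun (st : Option String × Nat) c =>
        let p := pvPrio c
        if p < st.2 then (some c, p) else st) st
    = if pvMinp cols < st.2
        then (cols.find? (fun c => pvPrio c == pvMinp cols), pvMinp cols)
        else st := by
  induction cols generalizing st with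
  | nil =>
    have : ¬ pvMinp [] < st.2 := by simp only [pvMinp, List.foldr]; omega
    simp [this]
  | cons a t ih =>
    have hmin : pvMinp (a :: t) = min (pvPrio a) (pvMinp t) := rfl
    have hb := pvPrio_bounds a
    simp only [List.foldl]
    by_cases ha : pvPrio a < st.2
    · simp only [if_pos ha]
      rw [ih (some a, pvPrio a) (by simpa using hb.2)]
      by_cases ht : pvMinp t < pvPrio a
      · have h1 : pvMinp (a :: t) = pvMinp t := by omega
        have hne : (pvPrio a == pvMinp (a :: t)) = false := by
          simp only [beq_eq_false_iff_ne, ne_eq]; omega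
        rw [if_pos ht, h1, if_pos (by omega), List.find?_cons]
        rw [h1] at hne
        simp only [hne]
      · have h1 : pvMinp (a :: t) = pvPrio a := by omega
        rw [if_neg ht, h1, if_pos ha, List.find?_cons]
        simp
    · simp only [if_neg ha]
      rw [ih st hst]
      by_cases ht : pvMinp t < st.2
      · have h1 : pvMinp (a :: t) = pvMinp t := by omega
        have hne : (pvPrio a == pvMinp (a :: t)) = false := by
          simp only [beq_eq_false_iff_ne, ne_eq]; omega
        rw [if_pos ht, h1, if_pos ht, List.find?_cons]
        rw [h1] at hne
        simp only [hne]
      · have h2 : ¬ pvMinp (a :: t) < st.2 := by omega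
        rw [if_neg ht, if_neg h2]

theorem pvAlt_eq (cols : List String) :
    pick_price_column_py_alt cols
    = if pvMinp cols < 6
        then cols.find? (fun c => pvPrio c == pvMinp cols)
        else none := by
  unfold pick_price_column_py_alt
  rw [pvLoop_eq cols (none, 6) (by omega)]
  by_cases h : pvMinp cols < 6 <;> simp [h]

-- ===== VERDICT =====
theorem pick_price_column_py_spec : Claim_equal_pick_price_column_py := by
  intro cols _
  unfold Spec_pick_price_column_py
  rw [pvAlt_eq]
  unfold pick_price_column_py
  simp only [PySem.Set.contains_iff, PySem.Set.mem_ofList]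
  by_cases h1 : "adjusted_close" ∈ cols
  · rw [if_pos h1]
    have hm1 : pvMinp cols = 1 := by
      have h := pvMinp_le_of_mem h1
      have hp : pvPrio "adjusted_close" = 1 := by decide
      rcases pvMinp_mem cols with h6 | ⟨c, _, hpc⟩
      · omega
      · have := (pvPrio_bounds c).1; omega
    have hfind : cols.find? (fun c => pvPrio c == pvMinp cols)
        = some "adjusted_close" := by
      rw [hm1]
      exact pvFind?_of_mem_uniq h1 (by decide)
        (fun b hb => (pvPrio_eq_one_iff b).mp (by simpa using hb))
    rw [if_pos (show pvMinp cols < 6 by omega), hfind]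
  · simp only [if_neg h1]
    have hno1 : ∀ c ∈ cols, pvPrio c ≠ 1 := fun c hc h =>
      h1 ((pvPrio_eq_one_iff c).mp h ▸ hc)
    cases h2 : cols.find? (fun c => PySem.Str.isIn "adj" c && PySem.Str.isIn "close" c) with
    | some c =>
      have hcmem : c ∈ cols := List.mem_of_find?_eq_some h2
      have hcp := List.find?_some h2
      have hc2 : pvPrio c = 2 :=
        (pvPrio_eq_two_iff (fun h => h1 (h ▸ hcmem))).mpr hcp
      have hm2 : pvMinp cols = 2 := by
        have hle := pvMinp_le_of_mem hcmem
        rcases pvMinp_mem cols with h6 | ⟨d, hd, hp⟩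
        · omega
        · have := (pvPrio_bounds d).1; have := hno1 d hd; omega
      have hfind : cols.find? (fun c => pvPrio c == pvMinp cols) = some c := by
        rw [hm2, ← h2]
        apply pvFind?_congr
        intro a ha
        have hiff := pvPrio_eq_two_iff (c := a) (fun h => h1 (h ▸ ha))
        cases hp : (PySem.Str.isIn "adj" a && PySem.Str.isIn "close" a) with
        | true => simp [hiff.mpr hp]
        | false =>
          have : pvPrio a ≠ 2 := fun h => by rw [hiff.mp h] at hp; cases hp
          simp [this]
      rw [if_pos (show pvMinp cols < 6 by omega), hfind]
    | none =>
      have hno2 : ∀ c ∈ cols, pvPrio c ≠ 2 := by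
        intro c hc h
        have hf := List.find?_eq_none.mp h2 c hc
        exact hf ((pvPrio_eq_two_iff (fun hh => h1 (hh ▸ hc))).mp h)
      by_cases h3 : "close" ∈ cols
      · rw [if_pos h3]
        have hm3 : pvMinp cols = 3 := by
          have hle := pvMinp_le_of_mem h3
          have hp3 : pvPrio "close" = 3 := by decide
          rcases pvMinp_mem cols with h6 | ⟨d, hd, hp⟩
          · omega
          · have := (pvPrio_bounds d).1
            have := hno1 d hd; have := hno2 d hd; omega
        have hfind : cols.find? (fun c => pvPrio c == pvMinp cols) = some "close" := by
          rw [hm3]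
          exact pvFind?_of_mem_uniq h3 (by decide)
            (fun b hb => (pvPrio_eq_three_iff b).mp (by simpa using hb))
        rw [if_pos (show pvMinp cols < 6 by omega), hfind]
      · simp only [if_neg h3]
        have hno3 : ∀ c ∈ cols, pvPrio c ≠ 3 := fun c hc h =>
          h3 ((pvPrio_eq_three_iff c).mp h ▸ hc)
        cases h4 : cols.find? (fun c => PySem.Str.isIn "nav" c) with
        | some c =>
          have hcmem : c ∈ cols := List.mem_of_find?_eq_some h4
          have hcp : PySem.Str.isIn "nav" c = true := List.find?_some h4
          have hc2f : (PySem.Str.isIn "adj" c && PySem.Str.isIn "close" c) = false := by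
            cases hx : (PySem.Str.isIn "adj" c && PySem.Str.isIn "close" c) with
            | true => exact absurd hx (List.find?_eq_none.mp h2 c hcmem)
            | false => rfl
          have hc4 : pvPrio c = 4 :=
            (pvPrio_eq_four_iff (fun h => h1 (h ▸ hcmem)) hc2f).mpr hcp
          have hm4 : pvMinp cols = 4 := by
            have hle := pvMinp_le_of_mem hcmem
            rcases pvMinp_mem cols with h6 | ⟨d, hd, hp⟩
            · omega
            · have := (pvPrio_bounds d).1
              have := hno1 d hd; have := hno2 d hd; have := hno3 d hd; omega
          have hfind : cols.find? (fun c => pvPrio c == pvMinp cols) = some c := by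
            rw [hm4, ← h4]
            apply pvFind?_congr
            intro a ha
            have ha2f : (PySem.Str.isIn "adj" a && PySem.Str.isIn "close" a) = false := by
              cases hx : (PySem.Str.isIn "adj" a && PySem.Str.isIn "close" a) with
              | true => exact absurd hx (List.find?_eq_none.mp h2 a ha)
              | false => rfl
            have hiff := pvPrio_eq_four_iff (c := a) (fun h => h1 (h ▸ ha)) ha2f
            cases hp : PySem.Str.isIn "nav" a with
            | true => simp [hiff.mpr hp]
            | false =>
              have : pvPrio a ≠ 4 := fun h => by rw [hiff.mp h] at hp; cases hp
              simp [this]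
          rw [if_pos (show pvMinp cols < 6 by omega), hfind]
        | none =>
          have hno4 : ∀ c ∈ cols, pvPrio c ≠ 4 := by
            intro c hc h
            have hc2f : (PySem.Str.isIn "adj" c && PySem.Str.isIn "close" c) = false := by
              cases hx : (PySem.Str.isIn "adj" c && PySem.Str.isIn "close" c) with
              | true => exact absurd hx (List.find?_eq_none.mp h2 c hc)
              | false => rfl
            exact (List.find?_eq_none.mp h4 c hc)
              ((pvPrio_eq_four_iff (fun hh => h1 (hh ▸ hc)) hc2f).mp h)
          cases h5 : cols.find? (fun c => PySem.Str.isIn "price" c) with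
          | some c =>
            have hcmem : c ∈ cols := List.mem_of_find?_eq_some h5
            have hcp : PySem.Str.isIn "price" c = true := List.find?_some h5
            have hc2f : (PySem.Str.isIn "adj" c && PySem.Str.isIn "close" c) = false := by
              cases hx : (PySem.Str.isIn "adj" c && PySem.Str.isIn "close" c) with
              | true => exact absurd hx (List.find?_eq_none.mp h2 c hcmem)
              | false => rfl
            have hc4f : PySem.Str.isIn "nav" c = false := by
              cases hx : PySem.Str.isIn "nav" c with
              | true => exact absurd hx (List.find?_eq_none.mp h4 c hcmem)
              | false => rfl
            have hc5 : pvPrio c = 5 :=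
              (pvPrio_eq_five_iff (fun h => h1 (h ▸ hcmem)) hc2f hc4f).mpr hcp
            have hm5 : pvMinp cols = 5 := by
              have hle := pvMinp_le_of_mem hcmem
              rcases pvMinp_mem cols with h6 | ⟨d, hd, hp⟩
              · omega
              · have := (pvPrio_bounds d).1
                have := hno1 d hd; have := hno2 d hd
                have := hno3 d hd; have := hno4 d hd; omega
            have hfind : cols.find? (fun c => pvPrio c == pvMinp cols) = some c := by
              rw [hm5, ← h5]
              apply pvFind?_congr
              intro a ha
              have ha2f : (PySem.Str.isIn "adj" a && PySem.Str.isIn "close" a) = false := by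
                cases hx : (PySem.Str.isIn "adj" a && PySem.Str.isIn "close" a) with
                | true => exact absurd hx (List.find?_eq_none.mp h2 a ha)
                | false => rfl
              have ha4f : PySem.Str.isIn "nav" a = false := by
                cases hx : PySem.Str.isIn "nav" a with
                | true => exact absurd hx (List.find?_eq_none.mp h4 a ha)
                | false => rfl
              have hiff := pvPrio_eq_five_iff (c := a) (fun h => h1 (h ▸ ha)) ha2f ha4f
              cases hp : PySem.Str.isIn "price" a with
              | true => simp [hiff.mpr hp]
              | false =>
                have : pvPrio a ≠ 5 := fun h => by rw [hiff.mp h] at hp; cases hp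
                simp [this]
            rw [if_pos (show pvMinp cols < 6 by omega), hfind]
          | none =>
            have hno5 : ∀ c ∈ cols, pvPrio c ≠ 5 := by
              intro c hc h
              have hc2f : (PySem.Str.isIn "adj" c && PySem.Str.isIn "close" c) = false := by
                cases hx : (PySem.Str.isIn "adj" c && PySem.Str.isIn "close" c) with
                | true => exact absurd hx (List.find?_eq_none.mp h2 c hc)
                | false => rfl
              have hc4f : PySem.Str.isIn "nav" c = false := by
                cases hx : PySem.Str.isIn "nav" c with
                | true => exact absurd hx (List.find?_eq_none.mp h4 c hc)
                | false => rfl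
              exact (List.find?_eq_none.mp h5 c hc)
                ((pvPrio_eq_five_iff (fun hh => h1 (hh ▸ hc)) hc2f hc4f).mp h)
            have hm6 : pvMinp cols = 6 := by
              rcases pvMinp_mem cols with h6 | ⟨d, hd, hp⟩
              · exact h6
              · have := pvPrio_bounds d
                have := hno1 d hd; have := hno2 d hd; have := hno3 d hd
                have := hno4 d hd; have := hno5 d hd
                omega
            rw [if_neg (show ¬ pvMinp cols < 6 by omega)]
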